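-- pv_equiv track=rewrite | github.com/lasttillend/CS61A | miscellaneous/OOG_Review.py | mystery8
-- ===== SOURCE A (Python) =====
-- def mystery8(n):
-- 	if n == 0: return ''
-- 	result, stringified = '', str(n)
-- 	for digit in stringified:
-- 		for _ in range(n):
-- 			result += digit
-- 	result += mystery8(n - 1)
-- 	return result
-- ===== SOURCE B (Python) =====
-- def mystery8(n):
--     result = ''
--     for k in range(1, n + 1):
--         seg = ''
--         for d in str(k):
--             seg += d * k
--         result = seg + result
--     return result
-- ===== Notes on version B (the rewrite author's own statement) =====
-- stated objective: simpler
-- what changed: Replaced the recursive descent (segment for n, then recurse on n-1) by a single iterative loop k=1..n that builds the same string back-to-front by prepending each level's segment.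
import Mathlib
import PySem

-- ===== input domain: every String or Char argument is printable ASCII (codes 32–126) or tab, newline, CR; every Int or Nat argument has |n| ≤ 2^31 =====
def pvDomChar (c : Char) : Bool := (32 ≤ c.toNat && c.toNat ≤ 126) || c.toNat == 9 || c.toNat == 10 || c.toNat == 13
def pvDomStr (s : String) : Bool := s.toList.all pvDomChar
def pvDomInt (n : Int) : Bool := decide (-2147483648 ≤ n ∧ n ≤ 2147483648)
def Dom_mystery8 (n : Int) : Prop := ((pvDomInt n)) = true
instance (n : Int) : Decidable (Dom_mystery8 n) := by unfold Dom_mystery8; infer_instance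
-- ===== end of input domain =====

-- B replaces A's recursive descent by an iterative loop k = 1..n that prepends each level's
-- segment, building the identical string back-to-front (objective: simpler, no recursion).

-- ===== PORT A =====
-- Literal port of A. For n < 0 the Python recurses forever (RecursionError); that case is
-- outside Pre_, and the guard below only makes the Lean function total there.
def mystery8 (n : Int) : String :=
  if n = 0 then ""
  else if n < 0 then ""   -- Python raises RecursionError here; excluded by Pre_mystery8
  else
    let stringified := PySem.Int.toChars n
    let result := stringified.foldl
      (fun r digit => (PySem.List.pyRange 0 n 1).foldl (fun r _ => r ++ digit.toString) r) ""
    result ++ mystery8 (n - 1)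
termination_by n.toNat
decreasing_by omega

-- ===== PORT B =====
def mystery8_alt (n : Int) : String :=
  (PySem.List.pyRange 1 (n + 1) 1).foldl
    (fun result k =>
      ((PySem.Int.toChars k).foldl
        (fun seg d => seg ++ String.ofList (List.replicate k.toNat d)) "") ++ result)
    ""

-- ===== PRECONDITION & SPEC =====
-- Pre_ excludes n < 0, on which the Python A recurses without bound (RecursionError).
def Pre_mystery8 (n : Int) : Prop := 0 ≤ n
instance (n : Int) : Decidable (Pre_mystery8 n) := by unfold Pre_mystery8; infer_instance
def pvWitness_mystery8 : Int := (3)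

def Spec_mystery8 (n : Int) (out : String) : Prop := out = mystery8_alt n
instance (n : Int) (out : String) : Decidable (Spec_mystery8 n out) := by unfold Spec_mystery8; infer_instance

-- ===== CLAIM (what is proved, stated in full; the proofs are below) =====
def Claim_equal_mystery8 : Prop := ∀ (n : Int), Dom_mystery8 n → Pre_mystery8 n → Spec_mystery8 n (mystery8 n)
-- ===== LEMMAS AND PROOFS =====

-- the segment built for level k, as B builds it
def pvSeg (k : Int) : String :=
  (PySem.Int.toChars k).foldl (fun seg d => seg ++ String.ofList (List.replicate k.toNat d)) ""

-- appending one char per element of a list = appending the replicate in one go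
theorem pv_rep_loop (d : Char) : ∀ (l : List Int) (r : String),
    l.foldl (fun r _ => r ++ d.toString) r = r ++ String.ofList (List.replicate l.length d) := by
  intro l
  induction l with
  | nil => intro r; apply String.toList_inj.mp; simp
  | cons x xs ih =>
      intro r
      simp only [List.foldl, ih, List.length_cons]
      apply String.toList_inj.mp
      simp [Char.toString, List.replicate_succ]

-- A's inner double loop computes pvSeg n (for 0 ≤ n)
theorem pv_inner (n : Int) (hn : 0 ≤ n) :
    (PySem.Int.toChars n).foldl
      (fun r digit => (PySem.List.pyRange 0 n 1).foldl (fun r _ => r ++ digit.toString) r) ""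
    = pvSeg n := by
  unfold pvSeg
  have hlen : (PySem.List.pyRange 0 n 1).length = n.toNat := by
    rw [PySem.List.length_pyRange_one]; omega
  have hstep : ∀ (r : String) (digit : Char),
      (PySem.List.pyRange 0 n 1).foldl (fun r _ => r ++ digit.toString) r
        = r ++ String.ofList (List.replicate n.toNat digit) := by
    intro r digit
    rw [pv_rep_loop digit, hlen]
  have hfun : (fun (r : String) (digit : Char) =>
      (PySem.List.pyRange 0 n 1).foldl (fun r _ => r ++ digit.toString) r)
      = (fun (seg : String) (d : Char) => seg ++ String.ofList (List.replicate n.toNat d)) := by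
    funext r d; exact hstep r d
  rw [hfun]

theorem pv_main : ∀ (m : Nat) (n : Int), n = (m : Int) → mystery8 n = mystery8_alt n := by
  intro m
  induction m with
  | zero =>
      intro n hn; subst hn
      simp [mystery8, mystery8_alt]
  | succ k ih =>
      intro n hn; subst hn
      have hpos : (0 : Int) < (k + 1 : Nat) := by exact_mod_cast Nat.succ_pos k
      rw [mystery8, if_neg (by omega), if_neg (by omega)]
      simp only [pv_inner ((k + 1 : Nat) : Int) (le_of_lt hpos)]
      have hprev : ((k + 1 : Nat) : Int) - 1 = (k : Int) := by push_cast; ring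
      rw [hprev, ih k rfl]
      unfold mystery8_alt
      have hsplit : PySem.List.pyRange 1 (((k + 1 : Nat) : Int) + 1) 1
          = PySem.List.pyRange 1 ((k : Int) + 1) 1 ++ [((k + 1 : Nat) : Int)] := by
        have h1 : ((k + 1 : Nat) : Int) + 1 = ((k : Int) + 1) + 1 := by push_cast; ring
        rw [h1, PySem.List.pyRange_one_succ_right (by omega)]
        push_cast; ring_nf
      rw [hsplit, List.foldl_append]
      simp only [List.foldl]
      rfl

-- ===== VERDICT (by name: the statement is the Claim_ definition above) =====
theorem mystery8_spec : Claim_equal_mystery8 := by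
  intro n _ hpre
  unfold Pre_mystery8 at hpre
  unfold Spec_mystery8
  exact pv_main n.toNat n (by omega)
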